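-- pv_equiv track=rewrite | github.com/Microsoftened-Nair/Cabsync | backend/main.py | _select_services
-- ===== SOURCE A (Python) =====
-- from typing import List, Optional, Sequence, Tuple
--
-- def _select_services(
--     services: Sequence[dict], vehicle_type: Optional[str]
-- ) -> List[dict]:
--     if not vehicle_type:
--         return list(services)
--
--     requested = vehicle_type.lower()
--     exact_matches = [
--         service for service in services if service.get("vehicle_type") == requested
--     ]
--     if exact_matches:
--         return exact_matches
--
--     fallback_map = {
--         "auto": {"auto", "car"},
--         "car": {"car", "suv"},
--         "bike": {"bike", "scooter"},
--     }
--     relaxed_types = fallback_map.get(requested, {requested})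
--     relaxed_matches = [
--         service
--         for service in services
--         if service.get("vehicle_type") in relaxed_types
--     ]
--     if relaxed_matches:
--         return relaxed_matches
--
--     return list(services)
-- ===== SOURCE B (Python) =====
-- def _relaxed_types(requested):
--     fallback_map = {
--         "auto": {"auto", "car"},
--         "car": {"car", "suv"},
--         "bike": {"bike", "scooter"},
--     }
--     return fallback_map.get(requested, {requested})
--
--
-- def _select_services(services, vehicle_type):
--     if not vehicle_type:
--         return list(services)
--     requested = vehicle_type.lower()
--     relaxed = _relaxed_types(requested)
--
--     def rank(service):
--         vt = service.get("vehicle_type")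
--         if vt == requested:
--             return 0
--         if vt in relaxed:
--             return 1
--         return 2
--
--     ranks = [rank(s) for s in services]
--     best = 2
--     for r in ranks:
--         best = min(best, r)
--     if best == 2:
--         return list(services)
--     return [s for s, r in zip(services, ranks) if r == best]
-- ===== Notes on version B (the rewrite author's own statement) =====
-- stated objective: alternative
-- what changed: B scores every service once with a priority rank (0 exact match, 1 relaxed match, 2 none), takes the minimum rank, and returns the services achieving that rank (all services when the minimum is 2), instead of A's staged filter-then-test passes.
import Mathlib
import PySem

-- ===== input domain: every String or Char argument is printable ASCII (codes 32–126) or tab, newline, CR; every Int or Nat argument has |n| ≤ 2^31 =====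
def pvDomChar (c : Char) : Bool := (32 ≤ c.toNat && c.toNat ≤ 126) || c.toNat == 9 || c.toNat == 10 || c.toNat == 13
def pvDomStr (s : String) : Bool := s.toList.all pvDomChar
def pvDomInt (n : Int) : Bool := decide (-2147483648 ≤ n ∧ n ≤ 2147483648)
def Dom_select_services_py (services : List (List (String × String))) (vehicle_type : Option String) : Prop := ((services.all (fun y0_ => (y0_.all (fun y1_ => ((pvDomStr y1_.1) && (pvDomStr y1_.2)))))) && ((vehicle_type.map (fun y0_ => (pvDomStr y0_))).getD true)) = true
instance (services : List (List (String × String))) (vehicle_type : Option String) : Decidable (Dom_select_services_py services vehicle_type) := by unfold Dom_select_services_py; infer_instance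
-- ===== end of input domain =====

-- B scores every service once with a priority rank (0 exact, 1 relaxed, 2 none), takes the minimum rank
-- and returns the services achieving it (all services when the minimum is 2), instead of A's staged passes.

-- ===== PORT A =====
def select_services_py (services : List (List (String × String))) (vehicle_type : Option String) : List (List (String × String)) :=
  match vehicle_type with
  | none => services
  | some vt =>
    if vt = "" then services
    else
      let requested := PySem.Str.lower vt
      let exact_matches := services.filter (fun svc => (PySem.Dict.mk svc).get? "vehicle_type" == some requested)
      if exact_matches ≠ [] then exact_matches
      else
        let fallback_map : PySem.Dict String (PySem.Set String) :=
          PySem.Dict.ofList [("auto", PySem.Set.ofList ["auto", "car"]),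
                             ("car", PySem.Set.ofList ["car", "suv"]),
                             ("bike", PySem.Set.ofList ["bike", "scooter"])]
        let relaxed_types := (fallback_map.get? requested).getD (PySem.Set.ofList [requested])
        let relaxed_matches := services.filter (fun svc =>
          match (PySem.Dict.mk svc).get? "vehicle_type" with
          | some v => PySem.Set.contains relaxed_types v
          | none => false)
        if relaxed_matches ≠ [] then relaxed_matches
        else services

-- ===== PORT B =====
-- helper for B: fallback_map.get(requested, {requested})
def pvRelaxedTypes (requested : String) : PySem.Set String :=
  let fallback_map : PySem.Dict String (PySem.Set String) :=
    PySem.Dict.ofList [("auto", PySem.Set.ofList ["auto", "car"]),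
                       ("car", PySem.Set.ofList ["car", "suv"]),
                       ("bike", PySem.Set.ofList ["bike", "scooter"])]
  (fallback_map.get? requested).getD (PySem.Set.ofList [requested])

-- helper for B: priority rank of one service (0 exact, 1 relaxed, 2 no match)
def pvRank (requested : String) (relaxed : PySem.Set String) (svc : List (String × String)) : Nat :=
  match (PySem.Dict.mk svc).get? "vehicle_type" with
  | some v => if v = requested then 0 else if PySem.Set.contains relaxed v then 1 else 2
  | none => 2

def select_services_py_alt (services : List (List (String × String))) (vehicle_type : Option String) : List (List (String × String)) :=
  match vehicle_type with
  | none => services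
  | some vt =>
    if vt = "" then services
    else
      let requested := PySem.Str.lower vt
      let relaxed := pvRelaxedTypes requested
      let ranks := services.map (pvRank requested relaxed)
      let best := ranks.foldl Nat.min 2
      if best = 2 then services
      else ((services.zip ranks).filter (fun pr => pr.2 == best)).map Prod.fst

-- ===== PRECONDITION & SPEC =====
def Spec_select_services_py (services : List (List (String × String))) (vehicle_type : Option String) (out : List (List (String × String))) : Prop := out = select_services_py_alt services vehicle_type
instance (services : List (List (String × String))) (vehicle_type : Option String) (out : List (List (String × String))) : Decidable (Spec_select_services_py services vehicle_type out) := by unfold Spec_select_services_py; infer_instance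

-- ===== CLAIM (what is proved, stated in full; the proofs are below) =====
def Claim_equal_select_services_py : Prop := ∀ (services : List (List (String × String))) (vehicle_type : Option String), Dom_select_services_py services vehicle_type → Spec_select_services_py services vehicle_type (select_services_py services vehicle_type)

-- ===== LEMMAS AND PROOFS =====

/-- Filtering the zip of a list with its mapped values by the mapped component is filtering by the function. -/
lemma zip_map_filter {α : Type} (f : α → Nat) (b : Nat) (xs : List α) :
    ((xs.zip (xs.map f)).filter (fun pr => pr.2 == b)).map Prod.fst
      = xs.filter (fun x => f x == b) := by
  induction xs with
  | nil => rfl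
  | cons x xs ih =>
    simp only [List.map_cons, List.zip_cons_cons, List.filter_cons]
    by_cases h : f x == b <;> simp [h, ih]

/-- foldl Nat.min over values ≤ 2, general initial value. -/
lemma foldl_min_char_aux (l : List Nat) (hl : ∀ x ∈ l, x ≤ 2) :
    ∀ a : Nat, a ≤ 2 → l.foldl Nat.min a =
      if a = 0 ∨ 0 ∈ l then 0 else if a = 1 ∨ 1 ∈ l then 1 else a := by
  induction l with
  | nil => intro a _; simp; split_ifs <;> omega
  | cons x l ih =>
    intro a ha
    have hx : x ≤ 2 := hl x (List.mem_cons_self ..)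
    simp only [List.foldl_cons]
    rw [ih (fun y hy => hl y (List.mem_cons_of_mem _ hy)) (Nat.min a x) ((Nat.min_le_left a x).trans ha)]
    by_cases h0 : 0 ∈ l <;> by_cases h1 : 1 ∈ l <;>
      simp only [List.mem_cons, h0, h1, or_true, or_false, Nat.min_def] <;>
      split_ifs <;> omega

/-- foldl Nat.min 2 over ranks in {0,1,2} picks the best rank present. -/
lemma foldl_min_char (l : List Nat) (hl : ∀ x ∈ l, x ≤ 2) :
    l.foldl Nat.min 2 = if 0 ∈ l then 0 else if 1 ∈ l then 1 else 2 := by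
  rw [foldl_min_char_aux l hl 2 (le_refl 2)]
  split_ifs <;> simp_all

/-- Core equivalence: A's staged filters equal B's best-rank selection, for any rank
    function with p ↔ rank 0 and (under ¬p) q ↔ rank 1. -/
lemma core {α : Type} (p q : α → Bool) (rank : α → Nat)
    (hp : ∀ s, p s = true ↔ rank s = 0)
    (hq : ∀ s, p s ≠ true → (q s = true ↔ rank s = 1))
    (hle : ∀ s, rank s ≤ 2) (xs : List α) :
    (if xs.filter p ≠ [] then xs.filter p
     else if xs.filter q ≠ [] then xs.filter q else xs)
    = (if (xs.map rank).foldl Nat.min 2 = 2 then xs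
       else ((xs.zip (xs.map rank)).filter
              (fun pr => pr.2 == (xs.map rank).foldl Nat.min 2)).map Prod.fst) := by
  rw [zip_map_filter]
  have hbest : (xs.map rank).foldl Nat.min 2
      = if 0 ∈ xs.map rank then 0 else if 1 ∈ xs.map rank then 1 else 2 := by
    refine foldl_min_char _ ?_
    intro x hx
    obtain ⟨s, _, rfl⟩ := List.mem_map.mp hx
    exact hle s
  rw [hbest]
  by_cases h0 : 0 ∈ xs.map rank
  · obtain ⟨s0, hs0, hr0⟩ := List.mem_map.mp h0
    have hpf : xs.filter p ≠ [] := by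
      intro hnil
      rw [List.filter_eq_nil_iff] at hnil
      exact hnil s0 hs0 ((hp s0).mpr hr0)
    rw [if_pos hpf]
    simp only [h0, if_true]
    rw [if_neg (by omega)]
    refine List.filter_congr ?_
    intro s _
    cases hps : p s
    · have hr : rank s ≠ 0 := fun h => by simp [(hp s).mpr h] at hps
      simp [hr]
    · simp [(hp s).mp hps]
  · have hpf : xs.filter p = [] :=
      List.filter_eq_nil_iff.mpr (fun s hs hps => h0 (List.mem_map.mpr ⟨s, hs, (hp s).mp hps⟩))
    rw [if_neg (by simp [hpf])]
    have hnp : ∀ s ∈ xs, p s ≠ true :=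
      fun s hs hps => h0 (List.mem_map.mpr ⟨s, hs, (hp s).mp hps⟩)
    simp only [h0, if_false]
    by_cases h1 : 1 ∈ xs.map rank
    · obtain ⟨s1, hs1, hr1⟩ := List.mem_map.mp h1
      have hqf : xs.filter q ≠ [] := by
        intro hnil
        rw [List.filter_eq_nil_iff] at hnil
        exact hnil s1 hs1 ((hq s1 (hnp s1 hs1)).mpr hr1)
      rw [if_pos hqf]
      simp only [h1, if_true]
      rw [if_neg (by omega)]
      refine List.filter_congr ?_
      intro s hs
      cases hqs : q s
      · have hr : rank s ≠ 1 := fun h => by simp [(hq s (hnp s hs)).mpr h] at hqs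
        simp [hr]
      · simp [(hq s (hnp s hs)).mp hqs]
    · have hqf : xs.filter q = [] :=
        List.filter_eq_nil_iff.mpr
          (fun s hs hqs => h1 (List.mem_map.mpr ⟨s, hs, (hq s (hnp s hs)).mp hqs⟩))
      rw [if_neg (by simp [hqf])]
      simp [h1]

theorem select_services_py_spec_aux (services : List (List (String × String))) (vehicle_type : Option String) :
    select_services_py services vehicle_type = select_services_py_alt services vehicle_type := by
  cases vehicle_type with
  | none => rfl
  | some vt =>
    unfold select_services_py select_services_py_alt
    by_cases hvt : vt = ""
    · simp [hvt]
    · simp only [hvt, if_false]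
      refine core
        (fun svc => (PySem.Dict.mk svc).get? "vehicle_type" == some (PySem.Str.lower vt))
        (fun svc => match (PySem.Dict.mk svc).get? "vehicle_type" with
          | some v => PySem.Set.contains (pvRelaxedTypes (PySem.Str.lower vt)) v
          | none => false)
        (pvRank (PySem.Str.lower vt) (pvRelaxedTypes (PySem.Str.lower vt)))
        ?_ ?_ ?_ services
      · intro s
        simp only [pvRank]
        cases hv : (PySem.Dict.mk s).get? "vehicle_type" with
        | none => simp
        | some v =>
          by_cases h : v = PySem.Str.lower vt
          · simp [h]
          · simp only [h, if_false]
            split_ifs <;> simp [h]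
      · intro s hps
        simp only [pvRank]
        cases hv : (PySem.Dict.mk s).get? "vehicle_type" with
        | none => simp
        | some v =>
          simp only [hv] at hps
          have h : ¬ v = PySem.Str.lower vt := by simpa using hps
          simp only [h, if_false]
          split_ifs <;> simp_all
      · intro s
        simp only [pvRank]
        cases hv : (PySem.Dict.mk s).get? "vehicle_type" with
        | none => simp
        | some v => dsimp only; split_ifs <;> omega

-- ===== VERDICT (by name: the statement is the Claim_ definition above) =====
theorem select_services_py_spec : Claim_equal_select_services_py := by
  intro services vehicle_type _
  unfold Spec_select_services_py
  exact select_services_py_spec_aux services vehicle_type
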